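-- pv_equiv track=rewrite | github.com/cwang392/SciSlice | parameters.py | zipVariables_gen
-- ===== SOURCE A (Python) =====
-- def zipVariables_gen(inputLists):
--     variableGenorators = []
--     for sublist in inputLists:
--         variableGenorators.append(variable_gen(sublist))
--
--     for _ in max(inputLists, key=len):
--         tempList = []
--         for varGen in variableGenorators:
--             tempList.append(next(varGen))
--         yield tempList
--
-- def variable_gen(variableList):
--     while True:
--         for var in variableList:
--             yield var
-- ===== SOURCE B (Python) =====
-- def zipVariables_gen(inputLists):
--     length = max(len(sub) for sub in inputLists)
--     for i in range(length):
--         yield [sub[i % len(sub)] for sub in inputLists]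
-- ===== Notes on version B (the rewrite author's own statement) =====
-- stated objective: simpler
-- what changed: Replaced the per-sublist infinite cycling generators (stateful next() on each) with a single loop over range(max length) that builds each row by direct modular indexing sub[i % len(sub)].
import Mathlib
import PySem

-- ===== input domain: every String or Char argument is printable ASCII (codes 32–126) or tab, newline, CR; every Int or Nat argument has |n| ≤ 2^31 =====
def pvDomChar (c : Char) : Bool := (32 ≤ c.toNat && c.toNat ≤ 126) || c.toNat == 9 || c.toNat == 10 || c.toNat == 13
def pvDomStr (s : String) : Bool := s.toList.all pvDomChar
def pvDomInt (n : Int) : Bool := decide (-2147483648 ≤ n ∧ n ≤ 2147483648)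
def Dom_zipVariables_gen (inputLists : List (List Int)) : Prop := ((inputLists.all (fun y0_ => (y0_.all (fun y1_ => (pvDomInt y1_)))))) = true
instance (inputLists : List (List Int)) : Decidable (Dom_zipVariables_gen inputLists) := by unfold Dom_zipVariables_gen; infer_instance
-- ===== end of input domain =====

-- B replaces A's stateful cycling generators with direct modular indexing over range(max length); objective: simpler.

-- ===== PORT A =====
-- Python max(inputLists, key=len): first sublist of maximal length (strictly longer replaces).
def pyMaxByLen : List (List Int) → Option (List Int)
  | [] => none
  | x :: xs => some (xs.foldl (fun best y => if y.length > best.length then y else best) x)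

-- next(variable_gen(s)) after n previous nexts yields s[n % len s] (exact for s ≠ []; for
-- s = [] Python diverges — such inputs are outside Pre_).
def pyCycleNext (s : List Int) (n : Nat) : Int := s.getD (n % s.length) 0

def zipVariables_gen (inputLists : List (List Int)) : List (List Int) :=
  let gens : List (List Int × Nat) := inputLists.map (fun s => (s, 0))
  match pyMaxByLen inputLists with
  | none => []  -- Python raises ValueError here; outside Pre_
  | some m =>
    ((List.range m.length).foldl
      (fun (acc : List (List Int) × List (List Int × Nat)) _ =>
        let tempList := acc.2.map (fun g => pyCycleNext g.1 g.2)
        (acc.1 ++ [tempList], acc.2.map (fun g => (g.1, g.2 + 1))))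
      ([], gens)).1

-- ===== PORT B =====
def zipVariables_gen_alt (inputLists : List (List Int)) : List (List Int) :=
  match inputLists with
  | [] => []  -- Python raises ValueError here; outside Pre_
  | x :: xs =>
    let length := xs.foldl (fun m s => max m s.length) x.length
    (List.range length).map (fun i => inputLists.map (fun s => s.getD (i % s.length) 0))

-- ===== PRECONDITION & SPEC =====
-- Pre_ excludes exactly the inputs where the Python A does not return: the empty list (max()
-- raises ValueError) and lists mixing an empty sublist with a nonempty one (A cycles an empty
-- sublist and hangs forever).
def Pre_zipVariables_gen (inputLists : List (List Int)) : Prop :=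
  inputLists ≠ [] ∧ ((∀ s ∈ inputLists, s = []) ∨ (∀ s ∈ inputLists, s ≠ []))
instance (inputLists : List (List Int)) : Decidable (Pre_zipVariables_gen inputLists) := by
  unfold Pre_zipVariables_gen; infer_instance

def pvWitness_zipVariables_gen : List (List Int) := [[1, 2, 3], [4, 5]]

def Spec_zipVariables_gen (inputLists : List (List Int)) (out : List (List Int)) : Prop := out = zipVariables_gen_alt inputLists
instance (inputLists : List (List Int)) (out : List (List Int)) : Decidable (Spec_zipVariables_gen inputLists out) := by unfold Spec_zipVariables_gen; infer_instance

-- ===== CLAIM (what is proved, stated in full; the proofs are below) =====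
def Claim_equal_zipVariables_gen : Prop := ∀ (inputLists : List (List Int)), Dom_zipVariables_gen inputLists → Pre_zipVariables_gen inputLists → Spec_zipVariables_gen inputLists (zipVariables_gen inputLists)

-- ===== LEMMAS AND PROOFS =====

-- the length of Python's max-by-len equals the fold of max over the lengths
theorem pyMaxByLen_length (x : List Int) (xs : List (List Int)) :
    (xs.foldl (fun best y => if y.length > best.length then y else best) x).length
      = xs.foldl (fun m s => max m s.length) x.length := by
  induction xs generalizing x with
  | nil => rfl
  | cons y ys ih =>
      simp only [List.foldl_cons]
      rw [ih]
      congr 1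
      split <;> omega

-- invariant of A's fold: after n steps the accumulator holds the first n modular rows and
-- every generator's counter is n
theorem zip_fold_inv (inputLists : List (List Int)) (n : Nat) :
    ((List.range n).foldl
      (fun (acc : List (List Int) × List (List Int × Nat)) _ =>
        let tempList := acc.2.map (fun g => pyCycleNext g.1 g.2)
        (acc.1 ++ [tempList], acc.2.map (fun g => (g.1, g.2 + 1))))
      ([], inputLists.map (fun s => (s, 0))))
    = ((List.range n).map (fun i => inputLists.map (fun s => s.getD (i % s.length) 0)),
       inputLists.map (fun s => (s, n))) := by
  induction n with
  | zero => rfl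
  | succ n ih =>
      rw [List.range_succ, List.foldl_append, ih, List.map_append]
      simp [pyCycleNext, List.map_map, Function.comp_def]

theorem zipVariables_gen_eq (inputLists : List (List Int)) :
    zipVariables_gen inputLists = zipVariables_gen_alt inputLists := by
  cases inputLists with
  | nil => rfl
  | cons x xs =>
      unfold zipVariables_gen zipVariables_gen_alt pyMaxByLen
      simp only [zip_fold_inv, pyMaxByLen_length]

-- ===== VERDICT (by name: the statement is the Claim_ definition above) =====
theorem zipVariables_gen_spec : Claim_equal_zipVariables_gen := by
  intro inputLists _ _
  unfold Spec_zipVariables_gen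
  exact zipVariables_gen_eq inputLists
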